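-- pv_equiv track=rewrite | github.com/mxxseonkim/python-coding-test | 프로그래머스/unrated/160586. 대충 만든 자판/대충 만든 자판.py | solution
-- ===== SOURCE A (Python) =====
-- def solution(keymap, targets):
--     ch = list(set(''.join(targets)))
--     cnts = [[k.find(c) for k in keymap if c in k] for c in ch]
--     cnt = [min(c)+1 if c else 0 for c in cnts]
--     dic = dict(zip(ch, cnt))
--
--     answer = []
--     for target in targets:
--         answer.append(0)
--         for t in list(target):
--             if dic[t] == 0:
--                 answer[-1] = -1
--                 break
--             answer[-1] += dic[t]
--
--     return answer
-- ===== SOURCE B (Python) =====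
-- def solution(keymap, targets):
--     d = {}
--     for k in keymap:
--         for i, c in enumerate(k):
--             if c not in d or i + 1 < d[c]:
--                 d[c] = i + 1
--
--     def cost(target):
--         total = 0
--         for t in target:
--             v = d.get(t, 0)
--             if v == 0:
--                 return -1
--             total += v
--         return total
--
--     return [cost(t) for t in targets]
-- ===== Notes on version B (the rewrite author's own statement) =====
-- stated objective: idiomatic
-- what changed: B builds the per-character cost dict in one forward pass over the keymaps (min-updating d[c] at every occurrence) instead of A's per-distinct-character scan of all keymaps with .find, and scores targets with an early-return helper in a comprehension instead of A's append/answer[-1] mutation with break.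
import Mathlib
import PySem

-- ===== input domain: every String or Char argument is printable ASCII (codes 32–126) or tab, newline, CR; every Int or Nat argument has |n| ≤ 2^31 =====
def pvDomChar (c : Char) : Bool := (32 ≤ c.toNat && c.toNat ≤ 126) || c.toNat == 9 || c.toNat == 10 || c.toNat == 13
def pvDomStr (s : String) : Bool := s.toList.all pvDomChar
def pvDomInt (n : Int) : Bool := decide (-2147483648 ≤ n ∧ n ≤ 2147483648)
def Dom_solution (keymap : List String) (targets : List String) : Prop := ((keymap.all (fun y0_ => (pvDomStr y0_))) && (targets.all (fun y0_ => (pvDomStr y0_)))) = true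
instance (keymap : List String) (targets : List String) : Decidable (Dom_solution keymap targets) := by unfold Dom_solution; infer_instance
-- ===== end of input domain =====

-- B rebuilds the per-character cost table in one forward pass over the keymaps (min-update per
-- occurrence) instead of A's per-distinct-character scan of all keymaps with .find; same return
-- values, one pass over the keymap text instead of a rescan per distinct character.

-- ===== PORT A =====
-- inner loop over one target: answer[-1] accumulator with break on dic[t] == 0
-- (dic[t] is ported as getD: every char of a target is a key of dic by construction, so the
-- lookup never falls back to the default / never raises)
def aScore (dic : PySem.Dict Char Int) : List Char → Int → Int
  | [], acc => acc
  | t :: rest, acc =>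
    if dic.getD t 0 = 0 then -1
    else aScore dic rest (acc + dic.getD t 0)

def solution (keymap : List String) (targets : List String) : List Int :=
  let ch : List Char := PySem.Set.ofList (PySem.Str.join "" targets).toList
  let cnts : List (List Int) :=
    ch.map (fun c =>
      (keymap.filter (fun k => PySem.Str.isIn (String.ofList [c]) k)).map
        (fun k => PySem.Str.find k (String.ofList [c])))
  let cnt : List Int := cnts.map (fun l =>
    match PySem.List.min? l (fun x => x) with
    | some m => m + 1
    | none => 0)
  let dic : PySem.Dict Char Int := PySem.Dict.ofList (ch.zip cnt)
  targets.foldl (fun answer target => answer ++ [aScore dic target.toList 0]) []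

-- ===== PORT B =====
-- one enumerate step: if c not in d or i + 1 < d[c]: d[c] = i + 1
def bUpdate (d : PySem.Dict Char Int) (p : Int × Char) : PySem.Dict Char Int :=
  if d.contains p.2 = false || decide (p.1 + 1 < d.getD p.2 0) then d.insert p.2 (p.1 + 1) else d

def bBuild (keymap : List String) : PySem.Dict Char Int :=
  keymap.foldl (fun d k => (PySem.List.enumerate k.toList).foldl bUpdate d) PySem.Dict.empty

-- def cost(target): early return -1 on a missing char, else sum
def bCost (d : PySem.Dict Char Int) : List Char → Int → Int
  | [], total => total
  | t :: rest, total =>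
    let v := d.getD t 0
    if v = 0 then -1 else bCost d rest (total + v)

def solution_alt (keymap : List String) (targets : List String) : List Int :=
  let d := bBuild keymap
  targets.map (fun t => bCost d t.toList 0)

-- ===== PRECONDITION & SPEC =====
def Spec_solution (keymap : List String) (targets : List String) (out : List Int) : Prop := out = solution_alt keymap targets
instance (keymap : List String) (targets : List String) (out : List Int) : Decidable (Spec_solution keymap targets out) := by unfold Spec_solution; infer_instance

-- ===== CLAIM (what is proved, stated in full; the proofs are below) =====
def Claim_equal_solution : Prop := ∀ (keymap : List String) (targets : List String), Dom_solution keymap targets → Spec_solution keymap targets (solution keymap targets)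

-- ===== LEMMAS AND PROOFS =====

-- option-valued running minimum
def omin (o : Option Int) (v : Int) : Option Int :=
  match o with
  | none => some v
  | some w => some (min w v)

-- index of the first occurrence of c in l (meaningful only when c ∈ l)
def firstIdx : List Char → Char → Nat
  | [], _ => 0
  | x :: t, c => if x = c then 0 else firstIdx t c + 1

-- the per-character cost both programs agree on, as an Option (none = char not on the keymaps)
def valO (keymap : List String) (c : Char) : Option Int :=
  keymap.foldl (fun o k => if c ∈ k.toList then omin o ((firstIdx k.toList c : Int) + 1) else o) none

theorem omin_absorb (o : Option Int) (a b : Int) (h : a ≤ b) : omin (omin o a) b = omin o a := by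
  cases o <;> simp [omin] <;> omega

theorem bUpdate_get? (d : PySem.Dict Char Int) (p : Int × Char) (c : Char) :
    (bUpdate d p).get? c = if p.2 = c then omin (d.get? c) (p.1 + 1) else d.get? c := by
  unfold bUpdate
  rcases p with ⟨i, x⟩
  by_cases hx : x = c
  · subst hx
    rw [PySem.Dict.contains_eq_isSome_get?, PySem.Dict.getD_eq_get?_getD]
    cases hg : d.get? x with
    | none => simp [omin]
    | some w =>
      by_cases hlt : i + 1 < w
      · simp [hlt, omin]; omega
      · simp [hlt, hg, omin]; omega
  · split
    · rw [PySem.Dict.get?_insert, if_neg (Ne.symm hx)]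
    · rfl

theorem enumerate_foldl_bUpdate (l : List Char) (n : Int) (d : PySem.Dict Char Int) (c : Char) :
    ((PySem.List.enumerate l n).foldl bUpdate d).get? c =
      if c ∈ l then omin (d.get? c) (n + (firstIdx l c : Int) + 1) else d.get? c := by
  induction l generalizing n d with
  | nil => simp [PySem.List.enumerate_nil]
  | cons x t ih =>
    rw [PySem.List.enumerate_cons, List.foldl_cons, ih]
    by_cases hx : x = c
    · subst hx
      by_cases hm : x ∈ t
      · simp only [hm, if_true, bUpdate_get?, List.mem_cons, true_or, firstIdx,
          Nat.cast_zero]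
        rw [omin_absorb _ _ _ (by omega)]
        norm_num
      · simp only [hm, if_false, bUpdate_get?, List.mem_cons, true_or, if_true,
          firstIdx, Nat.cast_zero]
        norm_num
    · have hne : ¬ c = x := fun h => hx h.symm
      by_cases hm : c ∈ t
      · simp only [hm, if_true, bUpdate_get?, List.mem_cons, hne, false_or,
          firstIdx, if_neg hx]
        congr 1
        push_cast
        ring
      · simp only [hm, if_false, bUpdate_get?, if_neg hx, List.mem_cons, hne, false_or]

theorem bBuild_get? (keymap : List String) (c : Char) :
    (bBuild keymap).get? c = valO keymap c := by
  unfold bBuild valO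
  suffices h : ∀ (d : PySem.Dict Char Int),
      (keymap.foldl (fun d k => (PySem.List.enumerate k.toList).foldl bUpdate d) d).get? c =
      keymap.foldl (fun o k => if c ∈ k.toList then omin o ((firstIdx k.toList c : Int) + 1) else o) (d.get? c) by
    rw [h PySem.Dict.empty, PySem.Dict.get?_empty]
  induction keymap with
  | nil => intro d; rfl
  | cons k rest ih =>
    intro d
    rw [List.foldl_cons, List.foldl_cons, ih, enumerate_foldl_bUpdate]
    split <;> simp

theorem singleton_infix_iff (c : Char) (l : List Char) : [c] <:+: l ↔ c ∈ l := by
  constructor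
  · intro h; exact List.singleton_sublist.mp h.sublist
  · intro h
    obtain ⟨s, t, rfl⟩ := List.append_of_mem h
    exact ⟨s, t, by simp⟩

theorem firstIdx_prefix (l : List Char) (c : Char) (h : c ∈ l) :
    [c] <+: l.drop (firstIdx l c) ∧ ∀ i < firstIdx l c, ¬ [c] <+: l.drop i := by
  induction l with
  | nil => cases h
  | cons x t ih =>
    by_cases hx : x = c
    · subst hx; simp [firstIdx]
    · have hm : c ∈ t := by cases h with
        | head => exact absurd rfl hx
        | tail _ h => exact h
      obtain ⟨h1, h2⟩ := ih hm
      refine ⟨by simpa [firstIdx, hx] using h1, ?_⟩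
      intro i hi hpre
      simp only [firstIdx, hx, if_false] at hi
      cases i with
      | zero =>
        rcases hpre with ⟨r, hr⟩
        simp at hr
        exact hx hr.1.symm
      | succ j => exact h2 j (by omega) (by simpa using hpre)

theorem find_singleton (l : List Char) (c : Char) :
    PySem.Chars.find l [c] = if c ∈ l then (firstIdx l c : Int) else -1 := by
  by_cases h : c ∈ l
  · have hnn : 0 ≤ PySem.Chars.find l [c] := by
      rw [PySem.Chars.find_nonneg_iff, singleton_infix_iff]; exact h
    obtain ⟨hs1, hs2⟩ := PySem.Chars.find_spec hnn
    obtain ⟨hf1, hf2⟩ := firstIdx_prefix l c h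
    have heq : (PySem.Chars.find l [c]).toNat = firstIdx l c := by
      rcases Nat.lt_trichotomy (PySem.Chars.find l [c]).toNat (firstIdx l c) with hlt | heq | hgt
      · exact absurd hs1 (hf2 _ hlt)
      · exact heq
      · exact absurd hf1 (hs2 _ hgt)
    simp only [h, if_true]
    omega
  · rw [if_neg h]
    rw [PySem.Chars.find_eq_neg_one_iff]
    rw [singleton_infix_iff]; exact h

theorem isIn_singleton (c : Char) (k : String) :
    PySem.Str.isIn (String.ofList [c]) k = decide (c ∈ k.toList) := by
  have hl : (String.ofList [c]).toList = [c] := by simp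
  rcases h : decide (c ∈ k.toList) with _ | _
  · simp only [decide_eq_false_iff_not] at h
    rw [PySem.Str.isIn_eq, hl, PySem.Chars.isIn_eq_false_iff, singleton_infix_iff]
    exact h
  · simp only [decide_eq_true_eq] at h
    rw [PySem.Str.isIn_eq, hl]
    rw [PySem.Chars.isIn_iff_infix, singleton_infix_iff]
    exact h

theorem foldl_omin_shift (t : List Int) (w : Int) :
    t.foldl (fun o v => omin o (v + 1)) (some w) = some (t.foldl (fun a v => min a (v + 1)) w) := by
  induction t generalizing w with
  | nil => rfl
  | cons a t' ih =>
    rw [List.foldl_cons, List.foldl_cons]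
    have h0 : omin (some w) (a + 1) = some (min w (a + 1)) := rfl
    rw [h0, ih]

theorem foldl_min_add_one (t : List Int) (h : Int) :
    t.foldl (fun a v => min a (v + 1)) (h + 1) = t.foldl min h + 1 := by
  induction t generalizing h with
  | nil => rfl
  | cons a t' ih =>
    simp only [List.foldl_cons]
    rw [show min (h + 1) (a + 1) = min h a + 1 by omega, ih]

theorem gval_eq (L : List Int) :
    (L.foldl (fun o v => omin o (v + 1)) none).getD 0 =
      (match PySem.List.min? L (fun x => x) with
       | some m => m + 1
       | none => 0) := by
  cases L with
  | nil => rfl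
  | cons h t =>
    rw [PySem.List.min?_id_cons]
    simp only [List.foldl_cons]
    have : omin none (h + 1) = some (h + 1) := rfl
    rw [this, foldl_omin_shift, foldl_min_add_one]
    rfl

-- A's per-character value equals B's per-character value
theorem valA_eq_valO (keymap : List String) (c : Char) :
    (match PySem.List.min?
        ((keymap.filter (fun k => PySem.Str.isIn (String.ofList [c]) k)).map
          (fun k => PySem.Str.find k (String.ofList [c]))) (fun x => x) with
     | some m => m + 1
     | none => 0) = (valO keymap c).getD 0 := by
  rw [← gval_eq]
  unfold valO
  rw [PySem.List.foldl_ite_eq_foldl_filter (p := fun k : String => c ∈ k.toList)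
      (f := fun o k => omin o ((firstIdx k.toList c : Int) + 1))]
  have hfilter : keymap.filter (fun k => PySem.Str.isIn (String.ofList [c]) k) =
      keymap.filter (fun k => decide (c ∈ k.toList)) := by
    apply List.filter_congr; intro k _; exact isIn_singleton c k
  rw [← hfilter, List.foldl_map]
  congr 1
  apply PySem.List.foldl_congr_mem
  intro acc k hk
  have hmem : c ∈ k.toList := by
    have := List.of_mem_filter hk
    rw [isIn_singleton] at this
    simpa using this
  have hl : (String.ofList [c]).toList = [c] := by simp
  rw [PySem.Str.find_eq, hl, find_singleton, if_pos hmem]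

theorem foldl_insert_get?_of_not_mem (pairs : List (Char × Int)) (d : PySem.Dict Char Int) (c : Char)
    (h : c ∉ pairs.map (·.1)) :
    (pairs.foldl (fun d p => d.insert p.1 p.2) d).get? c = d.get? c := by
  induction pairs generalizing d with
  | nil => rfl
  | cons p rest ih =>
    simp only [List.map_cons, List.mem_cons, not_or] at h
    rw [List.foldl_cons, ih _ h.2, PySem.Dict.get?_insert, if_neg h.1]

theorem foldl_insert_get?_of_mem (pairs : List (Char × Int)) (d : PySem.Dict Char Int) (c : Char) (v : Int)
    (hmem : (c, v) ∈ pairs) (hnd : (pairs.map (·.1)).Nodup) :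
    (pairs.foldl (fun d p => d.insert p.1 p.2) d).get? c = some v := by
  induction pairs generalizing d with
  | nil => cases hmem
  | cons p rest ih =>
    simp only [List.map_cons, List.nodup_cons] at hnd
    cases hmem with
    | head =>
      rw [List.foldl_cons, foldl_insert_get?_of_not_mem _ _ _ (by simpa using hnd.1),
        PySem.Dict.get?_insert, if_pos rfl]
    | tail _ hmem =>
      rw [List.foldl_cons]
      apply ih <;> first | exact hmem | exact hnd.2

theorem dic_get? (ch : List Char) (v : Char → Int) (c : Char) (hnd : ch.Nodup) (hc : c ∈ ch) :
    (PySem.Dict.ofList (ch.zip (ch.map v))).get? c = some (v c) := by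
  have hzip : ∀ (l : List Char), l.zip (l.map v) = l.map (fun x => (x, v x)) := by
    intro l
    induction l with
    | nil => rfl
    | cons a t iht => simp [iht]
  have hofList : PySem.Dict.ofList (ch.zip (ch.map v)) =
      (ch.zip (ch.map v)).foldl (fun d p => d.insert p.1 p.2) PySem.Dict.empty := rfl
  rw [hofList, hzip]
  apply foldl_insert_get?_of_mem
  · exact List.mem_map.mpr ⟨c, hc, rfl⟩
  · simpa [List.map_map, Function.comp_def] using hnd

theorem join_empty_toList (targets : List String) :
    (PySem.Str.join "" targets).toList = (targets.map String.toList).flatten := by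
  show (String.ofList (PySem.Chars.join ("".toList) (targets.map String.toList))).toList = _
  have h0 : ("" : String).toList = [] := rfl
  rw [h0]
  rw [show ∀ l : List Char, (String.ofList l).toList = l from fun l => by simp]
  induction targets with
  | nil => rfl
  | cons a rest ih =>
    cases rest with
    | nil => simp [PySem.Chars.join_singleton]
    | cons b r =>
      simp only [List.map_cons] at ih ⊢
      rw [PySem.Chars.join_cons_cons]
      simp only [List.flatten_cons] at ih ⊢
      simp [ih]

theorem score_congr (dicA dB : PySem.Dict Char Int) (rest : List Char) (acc : Int)
    (h : ∀ t ∈ rest, dicA.getD t 0 = dB.getD t 0) :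
    aScore dicA rest acc = bCost dB rest acc := by
  induction rest generalizing acc with
  | nil => rfl
  | cons t r ih =>
    have ht := h t (List.mem_cons_self ..)
    simp only [aScore, bCost, ht]
    split
    · rfl
    · apply ih
      intro x hx
      exact h x (List.mem_cons_of_mem _ hx)

-- ===== VERDICT (by name: the statement is the Claim_ definition above) =====
theorem solution_spec : Claim_equal_solution := by
  intro keymap targets _
  unfold Spec_solution solution solution_alt
  simp only []
  rw [PySem.List.foldl_append_singleton_eq_map, List.nil_append]
  apply List.map_congr_left
  intro target htarget
  apply score_congr
  intro t ht
  have hch : t ∈ PySem.Set.ofList (PySem.Str.join "" targets).toList := by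
    rw [PySem.Set.mem_ofList, join_empty_toList, List.mem_flatten]
    exact ⟨target.toList, List.mem_map.mpr ⟨target, htarget, rfl⟩, ht⟩
  rw [List.map_map]
  rw [PySem.Dict.getD_eq_get?_getD, PySem.Dict.getD_eq_get?_getD]
  rw [dic_get? _ _ _ (PySem.Set.nodup_ofList _) hch, bBuild_get?]
  simp only [Function.comp, Option.getD_some]
  exact valA_eq_valO keymap t
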